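-- pv_equiv track=rewrite | github.com/sangeon22/CodingTest | 프로그래머스/lv0/120956. 옹알이 （1）/옹알이 （1）.py | solution
-- ===== SOURCE A (Python) =====
-- def solution(babbling):
--     answer = 0
--     for i in babbling:
--         if "aya" or "ye" or "woo" or "ma" in i:
--             temp = i.replace("aya", "*").replace("ye", "*").replace("woo", "*").replace("ma", "*")
--             temp = temp.replace("*", "")
--             if not temp:
--                 answer += 1
--
--     return answer
-- ===== SOURCE B (Python) =====
-- def solution(babbling):
--     # greedy single-pass segmentation: each allowed syllable starts with a
--     # distinct letter, so at every position at most one syllable can match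
--     def ok(w):
--         i, n = 0, len(w)
--         while i < n:
--             if w.startswith("aya", i):
--                 i += 3
--             elif w.startswith("ye", i):
--                 i += 2
--             elif w.startswith("woo", i):
--                 i += 3
--             elif w.startswith("ma", i):
--                 i += 2
--             else:
--                 return False
--         return True
--     return sum(ok(w) for w in babbling)
-- ===== Notes on version B (the rewrite author's own statement) =====
-- stated objective: idiomatic
-- what changed: B replaces A's four sequential string-replace passes plus a sentinel-deletion pass by a single left-to-right greedy segmentation per word (each allowed syllable starts with a distinct letter, so greedy matching is exact).
-- outside the precondition, e.g. on solution(['*']): A returns 1, B returns 0; on solution(['aya*ye']): A returns 1, B returns 0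
import Mathlib
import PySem

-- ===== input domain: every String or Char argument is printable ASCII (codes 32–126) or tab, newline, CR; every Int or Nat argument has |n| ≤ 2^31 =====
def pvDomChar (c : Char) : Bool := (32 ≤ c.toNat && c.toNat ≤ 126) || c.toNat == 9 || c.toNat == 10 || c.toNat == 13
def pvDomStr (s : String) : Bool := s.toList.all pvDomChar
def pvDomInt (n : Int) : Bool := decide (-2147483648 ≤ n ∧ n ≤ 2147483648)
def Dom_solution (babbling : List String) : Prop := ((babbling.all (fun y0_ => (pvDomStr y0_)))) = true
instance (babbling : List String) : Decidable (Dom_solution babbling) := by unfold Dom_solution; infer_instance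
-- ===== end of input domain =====

-- B replaces A's four sequential replace passes (+ sentinel deletion) by one greedy
-- left-to-right syllable segmentation per word (objective: idiomatic single pass).

-- ===== PORT A =====
def solution (babbling : List String) : Int :=
  babbling.foldl (fun answer i =>
    -- Python guard `if "aya" or "ye" or "woo" or "ma" in i:` — the string "aya" is truthy, so always taken
    if true then
      let temp := PySem.Str.replace (PySem.Str.replace (PySem.Str.replace (PySem.Str.replace i "aya" "*") "ye" "*") "woo" "*") "ma" "*"
      let temp := PySem.Str.replace temp "*" ""
      if PySem.Str.len temp = 0 then answer + 1 else answer
    else answer) 0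

-- ===== PORT B =====
-- Source B's `ok(w)`: the index-advancing startswith loop, as consumption of the remaining suffix
def okChars : List Char → Bool
  | [] => true
  | c :: t =>
    if List.isPrefixOf ['a','y','a'] (c :: t) then okChars (t.drop 2)
    else if List.isPrefixOf ['y','e'] (c :: t) then okChars (t.drop 1)
    else if List.isPrefixOf ['w','o','o'] (c :: t) then okChars (t.drop 2)
    else if List.isPrefixOf ['m','a'] (c :: t) then okChars (t.drop 1)
    else false
  termination_by l => l.length

def solution_alt (babbling : List String) : Int :=
  babbling.foldl (fun acc w => acc + (if okChars w.toList then 1 else 0)) 0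

-- ===== PRECONDITION & SPEC =====
-- Pre_ excludes words containing the literal character '*' — outside the problem's natural
-- domain (babbling words) — on which A's use of '*' as an internal sentinel silently deletes
-- input characters (e.g. A counts "aya*ye").
def Pre_solution (babbling : List String) : Prop := ∀ w ∈ babbling, '*' ∉ w.toList
instance (babbling : List String) : Decidable (Pre_solution babbling) := by unfold Pre_solution; infer_instance

def pvWitness_solution : List String := ["ayaye", "wmoo", ""]

def Spec_solution (babbling : List String) (out : Int) : Prop := out = solution_alt babbling
instance (babbling : List String) (out : Int) : Decidable (Spec_solution babbling out) := by unfold Spec_solution; infer_instance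

-- ===== CLAIM (what is proved, stated in full; the proofs are below) =====
def Claim_equal_solution : Prop := ∀ (babbling : List String), Dom_solution babbling → Pre_solution babbling → Spec_solution babbling (solution babbling)

-- ===== LEMMAS AND PROOFS =====

-- simple structural model of CPython's leftmost non-overlapping replace
def myRep (old new : List Char) : List Char → List Char
  | [] => []
  | c :: t =>
    if List.isPrefixOf old (c :: t) then new ++ myRep old new (t.drop (old.length - 1))
    else c :: myRep old new t
  termination_by l => l.length

lemma myRep_nil (old new : List Char) : myRep old new [] = [] := by rw [myRep]

lemma myRep_cons (old new : List Char) (c : Char) (t : List Char) :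
    myRep old new (c :: t) =
      if List.isPrefixOf old (c :: t) then new ++ myRep old new (t.drop (old.length - 1))
      else c :: myRep old new t := by rw [myRep]

lemma go_eq_myRep (old new : List Char) (h : old ≠ []) :
    ∀ (fuel : Nat) (l acc : List Char), l.length ≤ fuel →
      PySem.Chars.replace.go old new fuel l acc = acc.reverse ++ myRep old new l := by
  intro fuel
  induction fuel with
  | zero =>
    intro l acc hl
    have : l = [] := List.eq_nil_of_length_eq_zero (Nat.le_zero.mp hl)
    subst this
    simp [PySem.Chars.replace.go, myRep_nil]
  | succ n ih =>
    intro l acc hl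
    match l with
    | [] => simp [PySem.Chars.replace.go, myRep_nil]
    | c :: t =>
      obtain ⟨o, os, rfl⟩ : ∃ o os, old = o :: os := by
        cases old with
        | nil => exact absurd rfl h
        | cons o os => exact ⟨o, os, rfl⟩
      by_cases hp : List.isPrefixOf (o :: os) (c :: t) = true
      · rw [show PySem.Chars.replace.go (o :: os) new (n+1) (c :: t) acc
            = PySem.Chars.replace.go (o :: os) new n (List.drop (o :: os).length (c :: t)) (new.reverse ++ acc) by
              simp [PySem.Chars.replace.go, hp]]
        rw [ih _ _ (by simp at hl ⊢; omega)]
        rw [myRep_cons, if_pos hp]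
        simp [List.drop_succ_cons]
      · rw [show PySem.Chars.replace.go (o :: os) new (n+1) (c :: t) acc
            = PySem.Chars.replace.go (o :: os) new n t (c :: acc) by
              simp [PySem.Chars.replace.go, hp]]
        rw [ih _ _ (by simp at hl; omega)]
        rw [myRep_cons, if_neg hp]
        simp

lemma replace_eq_myRep (l old new : List Char) (h : old ≠ []) :
    PySem.Chars.replace l old new = myRep old new l := by
  rw [PySem.Chars.replace]
  rw [if_neg (by simp [h])]
  simpa using go_eq_myRep old new h l.length l [] le_rfl

-- the final `.replace("*", "")` deletes exactly the '*' characters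
lemma delStar (l : List Char) : myRep ['*'] [] l = l.filter (fun c => !(c == '*')) := by
  induction l with
  | nil => simp [myRep_nil]
  | cons c t ih =>
    rw [myRep_cons]
    by_cases hc : c = '*'
    · subst hc; simp [List.isPrefixOf, ih]
    · rw [if_neg (by simp [List.isPrefixOf]; exact Ne.symm hc)]
      simp [hc, ih]

-- a star-free prefix of the output of a replace-by-'*' pass was already a prefix of the input
lemma star_free_prefix_transfer (old : List Char) (v : List Char) :
    ∀ tok : List Char, '*' ∉ tok →
      List.isPrefixOf tok (myRep old ['*'] v) = true →
      List.isPrefixOf tok v = true := by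
  induction v with
  | nil =>
    intro tok _ hh
    rw [myRep_nil] at hh
    exact hh
  | cons c t ih =>
    intro tok htok hh
    cases tok with
    | nil => simp
    | cons e ts =>
      rw [myRep_cons] at hh
      have hts : '*' ∉ ts := fun hm => htok (by simp [hm])
      have hes : ¬ ('*' = e) := by
        intro he; exact htok (by simp [← he])
      by_cases hp : List.isPrefixOf old (c :: t) = true
      · rw [if_pos hp] at hh
        simp only [List.cons_append, List.nil_append, List.isPrefixOf] at hh
        have := (Bool.and_eq_true _ _).mp hh
        have he : e = '*' := by simpa using this.1
        exact absurd he.symm hes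
      · rw [if_neg hp] at hh
        simp only [List.isPrefixOf] at hh ⊢
        have h1 := (Bool.and_eq_true _ _).mp hh
        exact (Bool.and_eq_true _ _).mpr ⟨h1.1, ih ts hts h1.2⟩

def pipe (l : List Char) : List Char :=
  myRep ['m','a'] ['*'] (myRep ['w','o','o'] ['*'] (myRep ['y','e'] ['*'] (myRep ['a','y','a'] ['*'] l)))

lemma main_key : ∀ (n : Nat) (l : List Char), l.length ≤ n → '*' ∉ l →
    (((pipe l).filter (fun c => !(c == '*'))) = [] ↔ okChars l = true) := by
  intro n
  induction n with
  | zero =>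
    intro l hl _
    have : l = [] := List.eq_nil_of_length_eq_zero (Nat.le_zero.mp hl)
    subst this
    simp [pipe, myRep_nil, okChars]
  | succ n ih =>
    intro l hl hstar
    match l with
    | [] => simp [pipe, myRep_nil, okChars]
    | c :: v =>
      by_cases h1 : List.isPrefixOf ['a','y','a'] (c :: v) = true
      · -- word starts with "aya"
        obtain ⟨u, hu⟩ := List.isPrefixOf_iff_prefix.mp h1
        obtain ⟨hc, hv⟩ : 'a' = c ∧ 'y' :: 'a' :: u = v := by simpa using hu
        subst hc; subst hv
        have hsu : '*' ∉ u := fun hm => hstar (by simp [hm])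
        have hlu : u.length ≤ n := by simp at hl; omega
        have hP : pipe ('a' :: 'y' :: 'a' :: u) = '*' :: pipe u := by
          unfold pipe
          rw [myRep_cons, if_pos (by simp [List.isPrefixOf])]
          simp only [List.length_cons, List.length_nil, List.drop_succ_cons, List.drop_zero,
            List.cons_append, List.nil_append]
          rw [myRep_cons (old := ['y','e']), if_neg (by simp [List.isPrefixOf])]
          rw [myRep_cons (old := ['w','o','o']), if_neg (by simp [List.isPrefixOf])]
          rw [myRep_cons (old := ['m','a']), if_neg (by simp [List.isPrefixOf])]
        rw [hP]
        rw [okChars, if_pos (by simp [List.isPrefixOf])]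
        simpa using ih u hlu hsu
      · by_cases h2 : List.isPrefixOf ['y','e'] (c :: v) = true
        · -- word starts with "ye"
          obtain ⟨u, hu⟩ := List.isPrefixOf_iff_prefix.mp h2
          obtain ⟨hc, hv⟩ : 'y' = c ∧ 'e' :: u = v := by simpa using hu
          subst hc; subst hv
          have hsu : '*' ∉ u := fun hm => hstar (by simp [hm])
          have hlu : u.length ≤ n := by simp at hl; omega
          have hP : pipe ('y' :: 'e' :: u) = '*' :: pipe u := by
            unfold pipe
            rw [myRep_cons (old := ['a','y','a']), if_neg (by simp [List.isPrefixOf])]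
            rw [myRep_cons (old := ['a','y','a']), if_neg (by simp [List.isPrefixOf])]
            rw [myRep_cons (old := ['y','e']), if_pos (by simp [List.isPrefixOf])]
            simp only [List.length_cons, List.length_nil, List.drop_succ_cons, List.drop_zero,
              List.cons_append, List.nil_append]
            rw [myRep_cons (old := ['w','o','o']), if_neg (by simp [List.isPrefixOf])]
            rw [myRep_cons (old := ['m','a']), if_neg (by simp [List.isPrefixOf])]
          rw [hP]
          rw [okChars, if_neg h1, if_pos (by simp [List.isPrefixOf])]
          simpa using ih u hlu hsu
        · by_cases h3 : List.isPrefixOf ['w','o','o'] (c :: v) = true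
          · -- word starts with "woo"
            obtain ⟨u, hu⟩ := List.isPrefixOf_iff_prefix.mp h3
            obtain ⟨hc, hv⟩ : 'w' = c ∧ 'o' :: 'o' :: u = v := by simpa using hu
            subst hc; subst hv
            have hsu : '*' ∉ u := fun hm => hstar (by simp [hm])
            have hlu : u.length ≤ n := by simp at hl; omega
            have hP : pipe ('w' :: 'o' :: 'o' :: u) = '*' :: pipe u := by
              unfold pipe
              rw [myRep_cons (old := ['a','y','a']), if_neg (by simp [List.isPrefixOf])]
              rw [myRep_cons (old := ['a','y','a']), if_neg (by simp [List.isPrefixOf])]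
              rw [myRep_cons (old := ['a','y','a']), if_neg (by simp [List.isPrefixOf])]
              rw [myRep_cons (old := ['y','e']), if_neg (by simp [List.isPrefixOf])]
              rw [myRep_cons (old := ['y','e']), if_neg (by simp [List.isPrefixOf])]
              rw [myRep_cons (old := ['y','e']), if_neg (by simp [List.isPrefixOf])]
              rw [myRep_cons (old := ['w','o','o']), if_pos (by simp [List.isPrefixOf])]
              simp only [List.length_cons, List.length_nil, List.drop_succ_cons, List.drop_zero,
                List.cons_append, List.nil_append]
              rw [myRep_cons (old := ['m','a']), if_neg (by simp [List.isPrefixOf])]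
            rw [hP]
            rw [okChars, if_neg h1, if_neg h2, if_pos (by simp [List.isPrefixOf])]
            simpa using ih u hlu hsu
          · by_cases h4 : List.isPrefixOf ['m','a'] (c :: v) = true
            · -- word starts with "ma"
              obtain ⟨u, hu⟩ := List.isPrefixOf_iff_prefix.mp h4
              obtain ⟨hc, hv⟩ : 'm' = c ∧ 'a' :: u = v := by simpa using hu
              subst hc; subst hv
              have hsu : '*' ∉ u := fun hm => hstar (by simp [hm])
              have hlu : u.length ≤ n := by simp at hl; omega
              by_cases hq : List.isPrefixOf ['a','y','a'] ('a' :: u) = true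
              · -- "ma" followed by "aya…": A's pipeline strands the 'm'
                obtain ⟨u2, hu2⟩ := List.isPrefixOf_iff_prefix.mp hq
                obtain hv2 : 'y' :: 'a' :: u2 = u := by simpa using hu2
                subst hv2
                have hP : pipe ('m' :: 'a' :: 'y' :: 'a' :: u2)
                    = 'm' :: '*' :: myRep ['m','a'] ['*'] (myRep ['w','o','o'] ['*'] (myRep ['y','e'] ['*'] (myRep ['a','y','a'] ['*'] u2))) := by
                  unfold pipe
                  rw [myRep_cons (old := ['a','y','a']), if_neg (by simp [List.isPrefixOf])]
                  rw [myRep_cons (old := ['a','y','a']), if_pos (by simp [List.isPrefixOf])]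
                  simp only [List.length_cons, List.length_nil, List.drop_succ_cons, List.drop_zero,
                    List.cons_append, List.nil_append]
                  rw [myRep_cons (old := ['y','e']), if_neg (by simp [List.isPrefixOf])]
                  rw [myRep_cons (old := ['y','e']), if_neg (by simp [List.isPrefixOf])]
                  rw [myRep_cons (old := ['w','o','o']), if_neg (by simp [List.isPrefixOf])]
                  rw [myRep_cons (old := ['w','o','o']), if_neg (by simp [List.isPrefixOf])]
                  rw [myRep_cons (old := ['m','a']), if_neg (by simp [List.isPrefixOf])]
                  rw [myRep_cons (old := ['m','a']), if_neg (by simp [List.isPrefixOf])]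
                rw [hP]
                rw [okChars, if_neg h1, if_neg h2, if_neg h3, if_pos h4]
                simp only [List.drop_succ_cons, List.drop_zero]
                rw [okChars, if_neg (by simp [List.isPrefixOf]), if_neg (by simp [List.isPrefixOf]),
                  if_neg (by simp [List.isPrefixOf]), if_neg (by simp [List.isPrefixOf])]
                simp
              · -- plain "ma" syllable
                have hP : pipe ('m' :: 'a' :: u) = '*' :: pipe u := by
                  unfold pipe
                  rw [myRep_cons (old := ['a','y','a']), if_neg (by simp [List.isPrefixOf])]
                  rw [myRep_cons (old := ['a','y','a']), if_neg hq]
                  rw [myRep_cons (old := ['y','e']), if_neg (by simp [List.isPrefixOf])]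
                  rw [myRep_cons (old := ['y','e']), if_neg (by simp [List.isPrefixOf])]
                  rw [myRep_cons (old := ['w','o','o']), if_neg (by simp [List.isPrefixOf])]
                  rw [myRep_cons (old := ['w','o','o']), if_neg (by simp [List.isPrefixOf])]
                  rw [myRep_cons (old := ['m','a']), if_pos (by simp [List.isPrefixOf])]
                  simp only [List.length_cons, List.length_nil, List.drop_succ_cons, List.drop_zero,
                    List.cons_append, List.nil_append]
                rw [hP]
                rw [okChars, if_neg h1, if_neg h2, if_neg h3, if_pos h4]
                simpa using ih u hlu hsu
            · -- no syllable matches at the front: the head character survives the pipeline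
              have hcstar : ¬ (c = '*') := fun he => hstar (by simp [he])
              have e1 : myRep ['a','y','a'] ['*'] (c :: v) = c :: myRep ['a','y','a'] ['*'] v := by
                rw [myRep_cons, if_neg h1]
              have h2' : ¬ (List.isPrefixOf ['y','e'] (c :: myRep ['a','y','a'] ['*'] v) = true) := by
                intro hh
                exact h2 (star_free_prefix_transfer ['a','y','a'] (c :: v) ['y','e'] (by decide)
                  (by rw [e1]; exact hh))
              have e2 : myRep ['y','e'] ['*'] (c :: myRep ['a','y','a'] ['*'] v)
                  = c :: myRep ['y','e'] ['*'] (myRep ['a','y','a'] ['*'] v) := by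
                rw [myRep_cons, if_neg h2']
              have h3' : ¬ (List.isPrefixOf ['w','o','o'] (c :: myRep ['y','e'] ['*'] (myRep ['a','y','a'] ['*'] v)) = true) := by
                intro hh
                refine h3 (star_free_prefix_transfer ['a','y','a'] (c :: v) ['w','o','o'] (by decide) ?_)
                rw [e1]
                exact star_free_prefix_transfer ['y','e'] (c :: myRep ['a','y','a'] ['*'] v) ['w','o','o'] (by decide)
                  (by rw [e2]; exact hh)
              have e3 : myRep ['w','o','o'] ['*'] (c :: myRep ['y','e'] ['*'] (myRep ['a','y','a'] ['*'] v))
                  = c :: myRep ['w','o','o'] ['*'] (myRep ['y','e'] ['*'] (myRep ['a','y','a'] ['*'] v)) := by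
                rw [myRep_cons, if_neg h3']
              have h4' : ¬ (List.isPrefixOf ['m','a'] (c :: myRep ['w','o','o'] ['*'] (myRep ['y','e'] ['*'] (myRep ['a','y','a'] ['*'] v))) = true) := by
                intro hh
                refine h4 (star_free_prefix_transfer ['a','y','a'] (c :: v) ['m','a'] (by decide) ?_)
                rw [e1]
                refine star_free_prefix_transfer ['y','e'] (c :: myRep ['a','y','a'] ['*'] v) ['m','a'] (by decide) ?_
                rw [e2]
                exact star_free_prefix_transfer ['w','o','o'] (c :: myRep ['y','e'] ['*'] (myRep ['a','y','a'] ['*'] v)) ['m','a'] (by decide)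
                  (by rw [e3]; exact hh)
              have hP : pipe (c :: v)
                  = c :: myRep ['m','a'] ['*'] (myRep ['w','o','o'] ['*'] (myRep ['y','e'] ['*'] (myRep ['a','y','a'] ['*'] v))) := by
                unfold pipe
                rw [e1, e2, e3, myRep_cons, if_neg h4']
              rw [hP]
              rw [okChars, if_neg h1, if_neg h2, if_neg h3, if_neg h4]
              simp [hcstar]

-- per-word agreement, at the string level
lemma word_key (w : String) (h : '*' ∉ w.toList) :
    (PySem.Str.len (PySem.Str.replace (PySem.Str.replace (PySem.Str.replace (PySem.Str.replace (PySem.Str.replace w "aya" "*") "ye" "*") "woo" "*") "ma" "*") "*" "") = 0)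
      ↔ okChars w.toList = true := by
  have haya : ("aya" : String).toList = ['a','y','a'] := rfl
  have hye : ("ye" : String).toList = ['y','e'] := rfl
  have hwoo : ("woo" : String).toList = ['w','o','o'] := rfl
  have hma : ("ma" : String).toList = ['m','a'] := rfl
  have hst : ("*" : String).toList = ['*'] := rfl
  have hem : ("" : String).toList = [] := rfl
  rw [PySem.Str.len_eq]
  simp only [PySem.Str.toList_replace, haya, hye, hwoo, hma, hst, hem]
  rw [replace_eq_myRep _ _ _ (by decide), replace_eq_myRep _ _ _ (by decide),
    replace_eq_myRep _ _ _ (by decide), replace_eq_myRep _ _ _ (by decide),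
    replace_eq_myRep _ _ _ (by decide)]
  rw [delStar]
  rw [Nat.cast_eq_zero, List.length_eq_zero_iff]
  exact main_key w.toList.length w.toList le_rfl h

lemma step_eq (a : Int) (w : String) (hw : '*' ∉ w.toList) :
    (if PySem.Str.len (PySem.Str.replace (PySem.Str.replace (PySem.Str.replace (PySem.Str.replace (PySem.Str.replace w "aya" "*") "ye" "*") "woo" "*") "ma" "*") "*" "") = 0
      then a + 1 else a)
      = a + (if okChars w.toList then 1 else 0) := by
  by_cases hok : okChars w.toList = true
  · rw [if_pos ((word_key w hw).mpr hok)]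
    simp [hok]
  · rw [if_neg (fun hh => hok ((word_key w hw).mp hh))]
    simp [Bool.not_eq_true] at hok
    simp [hok]

-- ===== VERDICT (by name: the statement is the Claim_ definition above) =====
theorem solution_spec : Claim_equal_solution := by
  intro babbling _ hpre
  unfold Spec_solution solution solution_alt
  refine PySem.List.foldl_congr_mem babbling _ _ 0 ?_
  intro a w hwmem
  beta_reduce
  simp only [reduceIte]
  exact step_eq a w (hpre w hwmem)
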